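-- pv_equiv track=rewrite | github.com/alstn113/algorithm | 프로그래머스/unrated/176963. 추억 점수/추억 점수.py | solution
-- ===== SOURCE A (Python) =====
-- def solution(name, yearning, photo):
--     dic = {}
--     result = []
--     for i in range(len(name)):
--         dic[name[i]] = yearning[i]
--
--     for p in photo:
--         tmp = 0
--         for t in p:
--             if t in dic:
--                 tmp += dic[t]
--
--         result.append(tmp)
--
--     return result
-- ===== SOURCE B (Python) =====
-- def solution(name, yearning, photo):
--     scores = {}
--     for n, y in zip(name, yearning):
--         scores[n] = y
--     return [sum(y * p.count(n) for n, y in scores.items()) for p in photo]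
-- ===== Notes on version B (the rewrite author's own statement) =====
-- stated objective: alternative
-- what changed: Instead of scanning each photo's attendees and summing dict lookups, B iterates over the distinct (name, yearning) pairs and adds yearning * p.count(name) per photo, inverting the inner loop from per-attendee lookup to per-person counting.
import Mathlib
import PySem

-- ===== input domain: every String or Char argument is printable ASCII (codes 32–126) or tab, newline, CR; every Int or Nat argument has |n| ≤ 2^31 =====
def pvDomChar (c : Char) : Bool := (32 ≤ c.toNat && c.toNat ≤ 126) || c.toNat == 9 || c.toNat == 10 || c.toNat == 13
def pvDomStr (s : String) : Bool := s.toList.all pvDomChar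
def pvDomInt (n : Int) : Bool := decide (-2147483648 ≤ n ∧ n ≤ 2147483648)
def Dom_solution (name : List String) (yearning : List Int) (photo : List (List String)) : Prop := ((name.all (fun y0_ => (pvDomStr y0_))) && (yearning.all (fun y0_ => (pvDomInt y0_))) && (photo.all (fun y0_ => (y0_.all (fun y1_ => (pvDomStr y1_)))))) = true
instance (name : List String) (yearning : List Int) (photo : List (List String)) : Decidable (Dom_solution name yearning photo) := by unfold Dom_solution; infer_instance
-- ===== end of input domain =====

-- B inverts the inner loop: per distinct (name, yearning) pair it adds yearning * count(photo, name),
-- instead of A's per-attendee dict lookup; same cost class, alternative decomposition.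


-- ===== PORT A =====
def solution (name : List String) (yearning : List Int) (photo : List (List String)) : List Int :=
  let dic := (PySem.List.pyRange 0 (name.length : Int) 1).foldl
    (fun d i => d.insert (PySem.List.pyGetD name i "") (PySem.List.pyGetD yearning i 0))
    PySem.Dict.empty
  photo.foldl
    (fun result p =>
      result ++ [p.foldl (fun tmp t => if dic.contains t then tmp + dic.getD t 0 else tmp) 0])
    []

-- ===== PORT B =====
def solution_alt (name : List String) (yearning : List Int) (photo : List (List String)) : List Int :=
  let scores := (name.zip yearning).foldl (fun d q => d.insert q.1 q.2) PySem.Dict.empty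
  photo.map (fun p => (scores.items.map (fun q => q.2 * (p.count q.1 : Int))).sum)

-- ===== PRECONDITION & SPEC =====
-- Pre_: A indexes yearning[i] for every i < len(name) and raises IndexError when yearning is shorter.
def Pre_solution (name : List String) (yearning : List Int) (photo : List (List String)) : Prop :=
  name.length ≤ yearning.length
instance (name : List String) (yearning : List Int) (photo : List (List String)) : Decidable (Pre_solution name yearning photo) := by unfold Pre_solution; infer_instance
def pvWitness_solution : List String × List Int × List (List String) := (["a", "b"], [3, 7], [["a", "b"], ["c"]])

def Spec_solution (name : List String) (yearning : List Int) (photo : List (List String)) (out : List Int) : Prop := out = solution_alt name yearning photo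
instance (name : List String) (yearning : List Int) (photo : List (List String)) (out : List Int) : Decidable (Spec_solution name yearning photo out) := by unfold Spec_solution; infer_instance

-- ===== CLAIM (what is proved, stated in full; the proofs are below) =====
def Claim_equal_solution : Prop := ∀ (name : List String) (yearning : List Int) (photo : List (List String)), Dom_solution name yearning photo → Pre_solution name yearning photo → Spec_solution name yearning photo (solution name yearning photo)

-- ===== LEMMAS AND PROOFS =====

-- A's index loop builds the same dict as B's zip loop (when yearning is long enough).
theorem dict_eq (name : List String) (yearning : List Int)
    (h : name.length ≤ yearning.length) (d : PySem.Dict String Int) :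
    (List.range name.length).foldl
      (fun d k => d.insert (name.getD k "") (yearning.getD k 0)) d
    = (name.zip yearning).foldl (fun d q => d.insert q.1 q.2) d := by
  induction name generalizing yearning d with
  | nil => simp
  | cons x xs ih =>
    cases yearning with
    | nil => simp at h
    | cons y ys =>
      simp only [List.length_cons, List.range_succ_eq_map, List.foldl_cons, List.foldl_map,
        List.getD_cons_zero, List.getD_cons_succ, List.zip_cons_cons]
      exact ih ys (by simpa using h) _

-- no key of l matches t → the masked sum is 0
theorem sum_if_zero (l : List (String × Int)) (t : String) (h : t ∉ l.map Prod.fst) :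
    (l.map (fun q => if q.1 == t then q.2 else 0)).sum = 0 := by
  induction l with
  | nil => simp
  | cons q l ih =>
    simp only [List.map_cons, List.mem_cons, not_or] at h
    have hbe : (q.1 == t) = false := beq_eq_false_iff_ne.mpr (fun he => h.1 he.symm)
    rw [List.map_cons, List.sum_cons, hbe, if_neg (by simp), ih h.2, add_zero]

-- with distinct keys, the masked sum picks exactly the value stored at t
theorem sum_if_eq (l : List (String × Int)) (h : (l.map Prod.fst).Nodup)
    (t : String) (v : Int) (hm : (t, v) ∈ l) :
    (l.map (fun q => if q.1 == t then q.2 else 0)).sum = v := by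
  induction l with
  | nil => simp at hm
  | cons q l ih =>
    simp only [List.map_cons, List.nodup_cons] at h
    rcases List.mem_cons.1 hm with rfl | hm'
    · simp only [List.map_cons, List.sum_cons, beq_self_eq_true, if_pos]
      rw [sum_if_zero l t h.1, add_zero]
    · have hne : q.1 ≠ t := fun he => h.1 (he ▸ List.mem_map_of_mem hm')
      rw [List.map_cons, List.sum_cons, beq_eq_false_iff_ne.mpr hne, if_neg (by simp), zero_add]
      exact ih h.2 hm'

-- A's inner accumulation over one photo equals B's per-person count sum, for any dict with distinct keys.
theorem photo_eq (d : PySem.Dict String Int) (hnd : d.keys.Nodup) (p : List String) (a : Int) :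
    p.foldl (fun tmp t => if d.contains t then tmp + d.getD t 0 else tmp) a
    = a + (d.items.map (fun q => q.2 * (p.count q.1 : Int))).sum := by
  induction p generalizing a with
  | nil => simp
  | cons t ts ih =>
    rw [List.foldl_cons, ih]
    have hcount : ∀ q : String × Int,
        q.2 * ((t :: ts).count q.1 : Int)
        = q.2 * (ts.count q.1 : Int) + (if q.1 == t then q.2 else 0) := by
      intro q
      rw [List.count_cons]
      by_cases hq : q.1 = t
      · simp [hq, mul_add]
      · have hbe : (t == q.1) = false := beq_eq_false_iff_ne.mpr (fun he => hq he.symm)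
        simp [hbe]
        exact fun he => absurd he hq
    simp only [hcount]
    rw [List.sum_map_add]
    by_cases hc : d.contains t = true
    · have ht : t ∈ d.keys := (PySem.Dict.contains_iff_mem_keys d t).1 hc
      obtain ⟨q, hq, hq1⟩ := List.mem_map.1 ht
      have hv : d.getD t 0 = q.2 := by
        have : (t, q.2) ∈ d.items := by
          have : q = (t, q.2) := by cases q; simp_all
          simpa [← this] using hq
        exact PySem.Dict.getD_of_mem_items d this hnd 0
      rw [if_pos hc, hv,
        sum_if_eq d.items hnd t q.2 (by
          have : q = (t, q.2) := by cases q; simp_all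
          simpa [← this] using hq)]
      ring
    · have ht : t ∉ d.items.map Prod.fst := by
        intro hmem
        exact hc ((PySem.Dict.contains_iff_mem_keys d t).2 hmem)
      rw [if_neg hc, sum_if_zero d.items t ht]
      ring

-- keys of B's dict are distinct
theorem nodup_scores (name : List String) (yearning : List Int) :
    ((name.zip yearning).foldl (fun d q => d.insert q.1 q.2)
      (PySem.Dict.empty : PySem.Dict String Int)).keys.Nodup := by
  exact PySem.Dict.nodup_keys_foldl_insert_key (name.zip yearning) Prod.fst
    (fun d q => q.2) PySem.Dict.empty (by simp)

-- ===== VERDICT (by name: the statement is the Claim_ definition above) =====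
theorem solution_spec : Claim_equal_solution := by
  intro name yearning photo _ hpre
  unfold Spec_solution solution solution_alt
  have hd : (PySem.List.pyRange 0 (name.length : Int) 1).foldl
      (fun d i => d.insert (PySem.List.pyGetD name i "") (PySem.List.pyGetD yearning i 0))
      PySem.Dict.empty
      = (name.zip yearning).foldl (fun d q => d.insert q.1 q.2) PySem.Dict.empty := by
    rw [PySem.List.pyRange_zero_nat]
    simp only [List.foldl_map, PySem.List.pyGetD_natCast]
    exact dict_eq name yearning hpre _
  rw [hd, PySem.List.foldl_append_singleton_eq_map]
  refine List.map_congr_left ?_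
  intro p _
  rw [photo_eq _ (nodup_scores name yearning) p 0, zero_add]
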